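-- pv_equiv track=rewrite | github.com/SocietyForArtisticResearch/rc_data | rc_parser/json2chart_iterate.py | count_tool_types_for_exposition
-- ===== SOURCE A (Python) =====
-- def count_tool_types_for_exposition(exposition):
--     """Count the different tool types for a given exposition."""
--     tool_types_count = {
--         "tool-text": 0,
--         "tool-simpletext": 0,
--         "tool-picture": 0,
--         "tool-audio": 0,
--         "tool-video": 0,
--         "tool-shape": 0,
--         "tool-pdf": 0,
--         "tool-slideshow": 0,
--         "tool-embed": 0,
--         "tool-iframe": 0
--     }
--
--     # Count tools by type for each page in the exposition
--     for page in exposition.get("pages", {}).values():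
--         for tool_type, tools in page.items():
--             if tool_type in tool_types_count:
--                 tool_types_count[tool_type] += len(tools)  # Count tools by number of elements
--
--     return tool_types_count
-- ===== SOURCE B (Python) =====
-- TOOL_TYPES = ["tool-text", "tool-simpletext", "tool-picture", "tool-audio",
--               "tool-video", "tool-shape", "tool-pdf", "tool-slideshow",
--               "tool-embed", "tool-iframe"]
--
--
-- def count_tool_types_for_exposition(exposition):
--     """Count the different tool types for a given exposition."""
--     pages = list(exposition.get("pages", {}).values())
--     return {tt: sum(len(tools) for page in pages
--                     for tool_type, tools in page.items() if tool_type == tt)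
--             for tt in TOOL_TYPES}
-- ===== Notes on version B (the rewrite author's own statement) =====
-- stated objective: simpler
-- what changed: A loops pages-outer/types-inner, mutating an accumulator dict guarded by a membership test; B inverts the decomposition to a key-outer dict comprehension that computes each tool type's total as one sum over all page entries, with no mutable accumulator or membership test.
import Mathlib
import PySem

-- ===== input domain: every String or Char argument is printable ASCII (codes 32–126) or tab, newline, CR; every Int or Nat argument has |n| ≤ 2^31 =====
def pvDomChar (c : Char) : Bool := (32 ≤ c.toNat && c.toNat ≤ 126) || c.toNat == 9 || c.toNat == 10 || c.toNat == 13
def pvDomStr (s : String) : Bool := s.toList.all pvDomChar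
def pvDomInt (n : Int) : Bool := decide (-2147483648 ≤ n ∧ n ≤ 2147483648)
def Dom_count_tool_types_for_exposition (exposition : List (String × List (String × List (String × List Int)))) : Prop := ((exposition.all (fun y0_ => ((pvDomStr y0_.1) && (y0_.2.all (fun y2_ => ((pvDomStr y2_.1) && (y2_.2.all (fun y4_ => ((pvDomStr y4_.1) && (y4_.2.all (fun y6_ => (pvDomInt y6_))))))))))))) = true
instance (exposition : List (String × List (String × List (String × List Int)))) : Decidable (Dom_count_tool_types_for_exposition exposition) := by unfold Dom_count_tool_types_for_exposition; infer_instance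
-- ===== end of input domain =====

-- B replaces A's page-outer accumulation into a mutable dict by a key-outer comprehension that
-- re-scans the pages for each of the ten tool-type keys (objective: simpler; same exact result).

-- ===== PORT A =====
def count_tool_types_for_exposition (exposition : List (String × List (String × List (String × List Int)))) : List (String × Int) :=
  let tool_types_count : PySem.Dict String Int :=
    PySem.Dict.ofList [("tool-text", 0), ("tool-simpletext", 0), ("tool-picture", 0),
      ("tool-audio", 0), ("tool-video", 0), ("tool-shape", 0), ("tool-pdf", 0),
      ("tool-slideshow", 0), ("tool-embed", 0), ("tool-iframe", 0)]
  let d := ((PySem.Dict.mk ((PySem.Dict.mk exposition).getD "pages" [])).values).foldl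
    (fun d page => page.foldl
      (fun d p => if d.contains p.1 then d.modify p.1 0 (· + (p.2.length : Int)) else d) d)
    tool_types_count
  d.items

-- ===== PORT B =====
-- module-level TOOL_TYPES list of Source B
def pvToolTypes : List String :=
  ["tool-text", "tool-simpletext", "tool-picture", "tool-audio", "tool-video",
   "tool-shape", "tool-pdf", "tool-slideshow", "tool-embed", "tool-iframe"]

def count_tool_types_for_exposition_alt (exposition : List (String × List (String × List (String × List Int)))) : List (String × Int) :=
  let pages := (PySem.Dict.mk ((PySem.Dict.mk exposition).getD "pages" [])).values
  pvToolTypes.map (fun tt =>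
    (tt, (pages.flatMap (fun page =>
            (page.filter (fun p => p.1 == tt)).map (fun p => (p.2.length : Int)))).sum))

-- ===== PRECONDITION & SPEC =====
def Spec_count_tool_types_for_exposition (exposition : List (String × List (String × List (String × List Int)))) (out : List (String × Int)) : Prop := out = count_tool_types_for_exposition_alt exposition
instance (exposition : List (String × List (String × List (String × List Int)))) (out : List (String × Int)) : Decidable (Spec_count_tool_types_for_exposition exposition out) := by unfold Spec_count_tool_types_for_exposition; infer_instance

-- ===== CLAIM (what is proved, stated in full; the proofs are below) =====
def Claim_equal_count_tool_types_for_exposition : Prop := ∀ (exposition : List (String × List (String × List (String × List Int)))), Dom_count_tool_types_for_exposition exposition → Spec_count_tool_types_for_exposition exposition (count_tool_types_for_exposition exposition)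

-- ===== LEMMAS AND PROOFS =====

-- inner page loop of A preserves the key set (and order) of the accumulator dict
theorem pv_keys_inner (page : List (String × List Int)) (d : PySem.Dict String Int) :
    (page.foldl
      (fun d p => if d.contains p.1 then d.modify p.1 0 (· + (p.2.length : Int)) else d) d).keys
    = d.keys := by
  induction page generalizing d with
  | nil => rfl
  | cons p l ih =>
    simp only [List.foldl_cons]
    split
    · rename_i h
      rw [ih, PySem.Dict.keys_modify, PySem.Dict.keys_insert_of_contains _ _ h]
    · rw [ih]

theorem pv_contains_inner (page : List (String × List Int)) (d : PySem.Dict String Int) (k : String) :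
    (page.foldl
      (fun d p => if d.contains p.1 then d.modify p.1 0 (· + (p.2.length : Int)) else d) d).contains k
    = d.contains k := by
  rw [PySem.Dict.contains_eq_decide_mem_keys, PySem.Dict.contains_eq_decide_mem_keys,
      pv_keys_inner]

-- value accumulated by A's inner loop at a key already present in the dict
theorem pv_getD_inner (page : List (String × List Int)) (d : PySem.Dict String Int) (k : String)
    (hk : d.contains k = true) :
    (page.foldl
      (fun d p => if d.contains p.1 then d.modify p.1 0 (· + (p.2.length : Int)) else d) d).getD k 0
    = d.getD k 0 + ((page.filter (fun p => p.1 == k)).map (fun p => (p.2.length : Int))).sum := by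
  induction page generalizing d with
  | nil => simp
  | cons p l ih =>
    simp only [List.foldl_cons, List.filter_cons]
    by_cases hc : d.contains p.1 = true
    · rw [if_pos hc]
      rw [ih _ (by simp [PySem.Dict.contains_modify, hk])]
      rw [PySem.Dict.getD_modify]
      by_cases he : p.1 = k
      · subst he
        simp only [BEq.rfl]
        simp
        omega
      · rw [if_neg (fun h => he h.symm)]
        have : (p.1 == k) = false := by simp [he]
        simp only [this, Bool.false_eq_true, if_false]
    · rw [if_neg hc]
      have he : (p.1 == k) = false := by
        by_contra h
        have : p.1 = k := by simpa using h
        exact hc (this ▸ hk)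
      rw [ih _ hk]
      simp only [he, Bool.false_eq_true, if_false]

-- A's outer loop over the pages: keys preserved, value is the sum over pages
theorem pv_keys_outer (ps : List (List (String × List Int))) (d : PySem.Dict String Int) :
    (ps.foldl
      (fun d page => page.foldl
        (fun d p => if d.contains p.1 then d.modify p.1 0 (· + (p.2.length : Int)) else d) d) d).keys
    = d.keys := by
  induction ps generalizing d with
  | nil => rfl
  | cons page l ih => rw [List.foldl_cons, ih, pv_keys_inner]

theorem pv_getD_outer (ps : List (List (String × List Int))) (d : PySem.Dict String Int) (k : String)
    (hk : d.contains k = true) :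
    (ps.foldl
      (fun d page => page.foldl
        (fun d p => if d.contains p.1 then d.modify p.1 0 (· + (p.2.length : Int)) else d) d) d).getD k 0
    = d.getD k 0
      + (ps.map (fun page =>
          ((page.filter (fun p => p.1 == k)).map (fun p => (p.2.length : Int))).sum)).sum := by
  induction ps generalizing d with
  | nil => simp
  | cons page l ih =>
    simp only [List.foldl_cons, List.map_cons, List.sum_cons]
    rw [ih _ (by rw [pv_contains_inner]; exact hk), pv_getD_inner _ _ _ hk]
    omega

-- the initial dict of A: keys, membership, zero values
theorem pv_d0_keys :
    (PySem.Dict.ofList [("tool-text", (0:Int)), ("tool-simpletext", 0), ("tool-picture", 0),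
      ("tool-audio", 0), ("tool-video", 0), ("tool-shape", 0), ("tool-pdf", 0),
      ("tool-slideshow", 0), ("tool-embed", 0), ("tool-iframe", 0)]).keys = pvToolTypes := by
  decide

theorem pv_d0_getD (k : String) (hk : k ∈ pvToolTypes) :
    (PySem.Dict.ofList [("tool-text", (0:Int)), ("tool-simpletext", 0), ("tool-picture", 0),
      ("tool-audio", 0), ("tool-video", 0), ("tool-shape", 0), ("tool-pdf", 0),
      ("tool-slideshow", 0), ("tool-embed", 0), ("tool-iframe", 0)]).getD k 0 = 0 := by
  fin_cases hk <;> decide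

-- ===== VERDICT (by name: the statement is the Claim_ definition above) =====
theorem count_tool_types_for_exposition_spec : Claim_equal_count_tool_types_for_exposition := by
  intro exposition _
  unfold Spec_count_tool_types_for_exposition
  unfold count_tool_types_for_exposition count_tool_types_for_exposition_alt
  set d0 : PySem.Dict String Int :=
    PySem.Dict.ofList [("tool-text", 0), ("tool-simpletext", 0), ("tool-picture", 0),
      ("tool-audio", 0), ("tool-video", 0), ("tool-shape", 0), ("tool-pdf", 0),
      ("tool-slideshow", 0), ("tool-embed", 0), ("tool-iframe", 0)] with hd0
  set ps := (PySem.Dict.mk ((PySem.Dict.mk exposition).getD "pages" [])).values with hps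
  have hkeys : (ps.foldl
      (fun d page => page.foldl
        (fun d p => if d.contains p.1 then d.modify p.1 0 (· + (p.2.length : Int)) else d) d) d0).keys
      = pvToolTypes := by
    rw [pv_keys_outer, hd0, pv_d0_keys]
  have hnd : (ps.foldl
      (fun d page => page.foldl
        (fun d p => if d.contains p.1 then d.modify p.1 0 (· + (p.2.length : Int)) else d) d) d0).keys.Nodup := by
    rw [hkeys]; decide
  rw [PySem.Dict.items_eq_map_keys _ hnd 0, hkeys]
  apply List.map_congr_left
  intro k hk
  have hc : d0.contains k = true := by
    rw [PySem.Dict.contains_eq_decide_mem_keys, hd0, pv_d0_keys]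
    simpa using hk
  rw [pv_getD_outer _ _ _ hc, hd0, pv_d0_getD k hk]
  simp [List.flatMap_def, List.sum_flatten, Function.comp_def]
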